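-- pv_equiv track=rewrite | github.com/Anurag-Patil/Classification-in-NLP | k-NN Classfier/knn-classifier.py | linfinitynorm
-- ===== SOURCE A (Python) =====
-- def linfinitynorm(bag_of_words1, frequency1, bag_of_words2, frequency2):
-- 	final_list = list(set().union(bag_of_words1, bag_of_words2))
-- 	distance = 0
-- 	for word in final_list:
-- 		a = 0
-- 		b = 0
-- 		if word in bag_of_words1:
-- 			a = frequency1[bag_of_words1.index(word)]
-- 		if word in bag_of_words2:
-- 			b = frequency2[bag_of_words2.index(word)]
-- 		if (distance < abs(a - b)):
-- 			distance = abs(a - b)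
-- 	return distance
-- ===== SOURCE B (Python) =====
-- def linfinitynorm(bag_of_words1, frequency1, bag_of_words2, frequency2):
--     def sorted_items(bag, freq):
--         seen = set()
--         pairs = []
--         for w, f in zip(bag, freq):
--             if w not in seen:
--                 seen.add(w)
--                 pairs.append((w, f))
--         pairs.sort(key=lambda p: p[0])
--         return pairs
--
--     p1 = sorted_items(bag_of_words1, frequency1)
--     p2 = sorted_items(bag_of_words2, frequency2)
--     i = 0
--     j = 0
--     dist = 0
--     while i < len(p1) and j < len(p2):
--         w1, a = p1[i]
--         w2, b = p2[j]
--         if w1 == w2: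
--             d = abs(a - b)
--             i += 1
--             j += 1
--         elif w1 < w2:
--             d = abs(a)
--             i += 1
--         else:
--             d = abs(b)
--             j += 1
--         if dist < d:
--             dist = d
--     while i < len(p1):
--         d = abs(p1[i][1])
--         if dist < d:
--             dist = d
--         i += 1
--     while j < len(p2):
--         d = abs(p2[j][1])
--         if dist < d:
--             dist = d
--         j += 1
--     return dist
-- ===== Notes on version B (the rewrite author's own statement) =====
-- stated objective: faster
-- what changed: Replaces A's union scan with per-word linear membership tests and list.index rescans by extracting each bag's distinct (word, first-occurrence frequency) pairs, sorting each side, and a two-pointer merge of the two sorted lists maximizing |a-b|.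
import Mathlib
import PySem

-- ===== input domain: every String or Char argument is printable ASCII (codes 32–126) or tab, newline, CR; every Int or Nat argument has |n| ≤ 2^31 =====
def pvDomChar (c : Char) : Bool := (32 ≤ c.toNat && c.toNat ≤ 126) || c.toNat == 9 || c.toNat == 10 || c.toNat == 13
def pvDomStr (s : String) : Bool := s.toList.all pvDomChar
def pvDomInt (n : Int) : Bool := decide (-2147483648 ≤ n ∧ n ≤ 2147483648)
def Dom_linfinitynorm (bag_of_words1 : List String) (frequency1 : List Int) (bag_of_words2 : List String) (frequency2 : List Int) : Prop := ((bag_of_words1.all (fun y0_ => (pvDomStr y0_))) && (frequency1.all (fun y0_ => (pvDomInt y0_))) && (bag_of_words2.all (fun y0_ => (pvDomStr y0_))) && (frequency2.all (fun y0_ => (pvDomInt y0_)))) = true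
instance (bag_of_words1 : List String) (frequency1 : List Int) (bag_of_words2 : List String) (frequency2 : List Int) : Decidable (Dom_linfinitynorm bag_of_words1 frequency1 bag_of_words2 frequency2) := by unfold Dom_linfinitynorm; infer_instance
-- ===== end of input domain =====

-- B replaces A's union scan (linear membership test + list.index rescan per word) by sorting each
-- bag's distinct first-occurrence (word, freq) pairs and a two-pointer merge (objective: faster).

-- ===== PORT A =====
def linfinitynorm (bag_of_words1 : List String) (frequency1 : List Int) (bag_of_words2 : List String) (frequency2 : List Int) : Int :=
  let final_list := PySem.Set.ofList (bag_of_words1 ++ bag_of_words2)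
  final_list.foldl (fun distance word =>
    -- 'if word in bag: a = frequency[bag.index(word)]': index? is some exactly when 'word in bag'
    let a : Int := match PySem.List.index? bag_of_words1 word with
      | some i => PySem.List.pyGetD frequency1 (i : Int) 0
      | none => 0
    let b : Int := match PySem.List.index? bag_of_words2 word with
      | some i => PySem.List.pyGetD frequency2 (i : Int) 0
      | none => 0
    if distance < |a - b| then |a - b| else distance) 0

-- ===== PORT B =====
-- B's 'sorted_items': one scan keeping the first occurrence of each word, then sort by word
def pvSortedItems (bag : List String) (freq : List Int) : List (String × Int) :=
  PySem.List.sorted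
    ((bag.zip freq).foldl
      (fun st p => if PySem.Set.contains st.1 p.1 then st else (PySem.Set.add st.1 p.1, st.2 ++ [p]))
      ((PySem.Set.empty : PySem.Set String), ([] : List (String × Int)))).2
    (fun p => p.1) false

-- B's main while loop (two-pointer merge) plus its two tail loops (the base cases)
def pvMergeLoop : List (String × Int) → List (String × Int) → Int → Int
  | [], q2, dist => q2.foldl (fun dist p => if dist < |p.2| then |p.2| else dist) dist
  | p :: q1, [], dist => (p :: q1).foldl (fun dist q => if dist < |q.2| then |q.2| else dist) dist
  | (w1, a) :: q1, (w2, b) :: q2, dist =>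
    if w1 = w2 then pvMergeLoop q1 q2 (if dist < |a - b| then |a - b| else dist)
    else if w1 < w2 then pvMergeLoop q1 ((w2, b) :: q2) (if dist < |a| then |a| else dist)
    else pvMergeLoop ((w1, a) :: q1) q2 (if dist < |b| then |b| else dist)
  termination_by q1 q2 _ => q1.length + q2.length

def linfinitynorm_alt (bag_of_words1 : List String) (frequency1 : List Int) (bag_of_words2 : List String) (frequency2 : List Int) : Int :=
  pvMergeLoop (pvSortedItems bag_of_words1 frequency1) (pvSortedItems bag_of_words2 frequency2) 0

-- ===== PRECONDITION & SPEC =====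
-- Pre_ excludes exactly the inputs on which A raises IndexError: a word whose first-occurrence
-- index in a bag is not a valid index of that bag's frequency list.
def Pre_linfinitynorm (bag_of_words1 : List String) (frequency1 : List Int) (bag_of_words2 : List String) (frequency2 : List Int) : Prop :=
  (∀ w ∈ bag_of_words1, (PySem.List.index? bag_of_words1 w).getD 0 < frequency1.length) ∧
  (∀ w ∈ bag_of_words2, (PySem.List.index? bag_of_words2 w).getD 0 < frequency2.length)
instance (bag_of_words1 : List String) (frequency1 : List Int) (bag_of_words2 : List String) (frequency2 : List Int) : Decidable (Pre_linfinitynorm bag_of_words1 frequency1 bag_of_words2 frequency2) := by unfold Pre_linfinitynorm; infer_instance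
def pvWitness_linfinitynorm : List String × List Int × List String × List Int := (["a", "b", "a"], [2, -1, 7], ["b", "c"], [4, 4])
def Spec_linfinitynorm (bag_of_words1 : List String) (frequency1 : List Int) (bag_of_words2 : List String) (frequency2 : List Int) (out : Int) : Prop := out = linfinitynorm_alt bag_of_words1 frequency1 bag_of_words2 frequency2
instance (bag_of_words1 : List String) (frequency1 : List Int) (bag_of_words2 : List String) (frequency2 : List Int) (out : Int) : Decidable (Spec_linfinitynorm bag_of_words1 frequency1 bag_of_words2 frequency2 out) := by unfold Spec_linfinitynorm; infer_instance

-- ===== CLAIM (what is proved, stated in full; the proofs are below) =====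
def Claim_equal_linfinitynorm : Prop := ∀ (bag_of_words1 : List String) (frequency1 : List Int) (bag_of_words2 : List String) (frequency2 : List Int), Dom_linfinitynorm bag_of_words1 frequency1 bag_of_words2 frequency2 → Pre_linfinitynorm bag_of_words1 frequency1 bag_of_words2 frequency2 → Spec_linfinitynorm bag_of_words1 frequency1 bag_of_words2 frequency2 (linfinitynorm bag_of_words1 frequency1 bag_of_words2 frequency2)

-- ===== LEMMAS AND PROOFS =====

-- A's per-word value: frequency at the word's first occurrence, 0 if absent
def pvValA (bag : List String) (freq : List Int) (w : String) : Int :=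
  match PySem.List.index? bag w with
  | some i => PySem.List.pyGetD freq (i : Int) 0
  | none => 0

-- lookup of a word in a pair list (0 when absent)
def pvLook (q : List (String × Int)) (w : String) : Int :=
  ((q.find? (fun p => p.1 == w)).map (·.2)).getD 0

def pvFirsts (seen : PySem.Set String) : List (String × Int) → List (String × Int)
  | [] => []
  | p :: ps =>
    if PySem.Set.contains seen p.1 then pvFirsts seen ps
    else p :: pvFirsts (PySem.Set.add seen p.1) ps

theorem pv_contains_add (seen : PySem.Set String) (x w : String) (hne : x ≠ w) :
    PySem.Set.contains (PySem.Set.add seen x) w = PySem.Set.contains seen w := by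
  rw [Bool.eq_iff_iff, PySem.Set.contains_iff, PySem.Set.contains_iff, PySem.Set.mem_add]
  exact ⟨fun h => h.resolve_right (fun h' => hne h'.symm), Or.inl⟩

theorem pv_scan_eq (ps : List (String × Int)) (seen : PySem.Set String) (acc : List (String × Int)) :
    (ps.foldl (fun st p => if PySem.Set.contains st.1 p.1 then st else (PySem.Set.add st.1 p.1, st.2 ++ [p])) (seen, acc)).2
      = acc ++ pvFirsts seen ps := by
  induction ps generalizing seen acc with
  | nil => simp [pvFirsts]
  | cons p ps ih =>
    rw [List.foldl_cons]
    by_cases hc : PySem.Set.contains seen p.1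
    · simp only [hc, if_pos, pvFirsts, ih]
    · simp only [hc, pvFirsts, Bool.false_eq_true, ite_false, ih, List.append_assoc,
        List.singleton_append]

theorem pv_find?_pvFirsts (ps : List (String × Int)) (seen : PySem.Set String) (w : String) :
    (pvFirsts seen ps).find? (fun p => p.1 == w)
      = if PySem.Set.contains seen w then none else ps.find? (fun p => p.1 == w) := by
  induction ps generalizing seen with
  | nil => simp [pvFirsts]
  | cons p ps ih =>
    by_cases hw : p.1 = w
    · subst hw
      by_cases hc : PySem.Set.contains seen p.1
      · rw [pvFirsts, if_pos hc, ih, if_pos hc, if_pos hc]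
      · rw [pvFirsts, if_neg hc, List.find?_cons_of_pos (by simp),
          if_neg hc, List.find?_cons_of_pos (by simp)]
    · by_cases hc : PySem.Set.contains seen p.1
      · rw [pvFirsts, if_pos hc, ih, List.find?_cons_of_neg (by simp [hw])]
      · rw [pvFirsts, if_neg hc, List.find?_cons_of_neg (by simp [hw]), ih,
          List.find?_cons_of_neg (by simp [hw]), pv_contains_add seen p.1 w hw]

theorem pv_mem_fst_pvFirsts (ps : List (String × Int)) (seen : PySem.Set String) (w : String) :
    w ∈ (pvFirsts seen ps).map Prod.fst ↔ (PySem.Set.contains seen w = false ∧ w ∈ ps.map Prod.fst) := by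
  have key : ∀ (l : List (String × Int)), w ∈ l.map Prod.fst ↔ (l.find? (fun p => p.1 == w)).isSome := by
    intro l
    rw [List.find?_isSome, List.mem_map]
    constructor
    · rintro ⟨p, hp, rfl⟩; exact ⟨p, hp, by simp⟩
    · rintro ⟨p, hp, hpw⟩; exact ⟨p, hp, beq_iff_eq.mp hpw⟩
  rw [key, key, pv_find?_pvFirsts]
  by_cases hc : w ∈ seen
  · simp [hc]
  · simp [hc]

theorem pv_nodup_fst_pvFirsts (ps : List (String × Int)) (seen : PySem.Set String) :
    ((pvFirsts seen ps).map Prod.fst).Nodup := by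
  induction ps generalizing seen with
  | nil => simp [pvFirsts]
  | cons p ps ih =>
    by_cases hc : PySem.Set.contains seen p.1
    · rw [pvFirsts, if_pos hc]; exact ih seen
    · rw [pvFirsts, if_neg hc]
      refine List.nodup_cons.mpr ⟨?_, ih _⟩
      rw [pv_mem_fst_pvFirsts]
      rintro ⟨habs, -⟩
      rw [Bool.eq_iff_iff] at habs
      simp only [PySem.Set.contains_iff, PySem.Set.mem_add] at habs
      simp at habs

theorem pv_find?_perm (l₁ l₂ : List (String × Int)) (w : String) (hp : l₁.Perm l₂)
    (hn : (l₂.map Prod.fst).Nodup) :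
    l₁.find? (fun p => p.1 == w) = l₂.find? (fun p => p.1 == w) := by
  cases h₂ : l₂.find? (fun p => p.1 == w) with
  | none =>
    rw [List.find?_eq_none] at h₂ ⊢
    exact fun x hx => h₂ x (hp.mem_iff.mp hx)
  | some q =>
    have hqmem : q ∈ l₂ := List.mem_of_find?_eq_some h₂
    have hqw : q.1 = w := beq_iff_eq.mp (List.find?_some (p := fun p : String × Int => p.1 == w) h₂)
    cases h₁ : l₁.find? (fun p => p.1 == w) with
    | none =>
      rw [List.find?_eq_none] at h₁
      exact absurd (by simp [hqw]) (h₁ q (hp.mem_iff.mpr hqmem))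
    | some r =>
      have hrmem : r ∈ l₂ := hp.mem_iff.mp (List.mem_of_find?_eq_some h₁)
      have hrw : r.1 = w := beq_iff_eq.mp (List.find?_some (p := fun p : String × Int => p.1 == w) h₁)
      rw [List.inj_on_of_nodup_map hn hrmem hqmem (hrw.trans hqw.symm)]

theorem pv_find?_zip_of_index? (bag : List String) (freq : List Int) (w : String) (i : Nat)
    (hi : PySem.List.index? bag w = some i) (hlen : i < freq.length) :
    (bag.zip freq).find? (fun p => p.1 == w) = some (w, freq.getD i 0) := by
  induction bag generalizing freq i with
  | nil => simp [PySem.List.index?] at hi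
  | cons x bs ih =>
    by_cases hx : x = w
    · subst hx
      rw [PySem.List.index?_cons_self] at hi
      obtain rfl : (0 : Nat) = i := Option.some.inj hi
      cases freq with
      | nil => simp at hlen
      | cons f fs => simp
    · rw [PySem.List.index?_cons_of_ne bs hx] at hi
      obtain ⟨j, hj, hji⟩ := Option.map_eq_some_iff.mp hi
      cases freq with
      | nil => simp at hlen
      | cons f fs =>
        subst hji
        simp only [List.zip_cons_cons, List.find?, show (x == w) = false by simp [hx]]
        simpa using ih fs j hj (by simpa using hlen)

theorem pv_find?_zip_of_not_mem (bag : List String) (freq : List Int) (w : String)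
    (hw : w ∉ bag) : (bag.zip freq).find? (fun p => p.1 == w) = none := by
  rw [List.find?_eq_none]
  rintro ⟨k, v⟩ hp hkw
  exact hw ((eq_of_beq hkw) ▸ (List.of_mem_zip hp).1)

theorem pv_look_zip (bag : List String) (freq : List Int) (w : String)
    (hpre : ∀ w ∈ bag, (PySem.List.index? bag w).getD 0 < freq.length) :
    pvLook (bag.zip freq) w = pvValA bag freq w := by
  unfold pvLook pvValA
  cases hi : PySem.List.index? bag w with
  | none =>
    rw [pv_find?_zip_of_not_mem bag freq w ((PySem.List.index?_eq_none_iff bag w).mp hi)]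
    rfl
  | some i =>
    have hmem : w ∈ bag := (PySem.List.index?_isSome_iff bag w).mp (by rw [hi]; rfl)
    have hlen : i < freq.length := by have h := hpre w hmem; rw [hi] at h; exact h
    rw [pv_find?_zip_of_index? bag freq w i hi hlen]
    simp [PySem.List.pyGetD_natCast]

theorem pv_mem_fst_zip (bag : List String) (freq : List Int) (w : String)
    (hpre : ∀ w ∈ bag, (PySem.List.index? bag w).getD 0 < freq.length) :
    w ∈ (bag.zip freq).map Prod.fst ↔ w ∈ bag := by
  constructor
  · intro h
    obtain ⟨p, hp, rfl⟩ := List.mem_map.mp h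
    exact (List.of_mem_zip hp).1
  · intro hmem
    cases hi : PySem.List.index? bag w with
    | none => exact absurd hmem ((PySem.List.index?_eq_none_iff bag w).mp hi)
    | some i =>
      have hlen : i < freq.length := by have h := hpre w hmem; rw [hi] at h; exact h
      exact List.mem_map.mpr ⟨(w, freq.getD i 0),
        List.mem_of_find?_eq_some (pv_find?_zip_of_index? bag freq w i hi hlen), rfl⟩

theorem pv_sortedItems_eq (bag : List String) (freq : List Int) :
    pvSortedItems bag freq
      = PySem.List.sorted (pvFirsts PySem.Set.empty (bag.zip freq)) (fun p => p.1) false := by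
  unfold pvSortedItems
  rw [pv_scan_eq]
  rfl

theorem pv_perm_sortedItems (bag : List String) (freq : List Int) :
    (pvSortedItems bag freq).Perm (pvFirsts PySem.Set.empty (bag.zip freq)) := by
  rw [pv_sortedItems_eq]
  exact PySem.List.sorted_perm _ _ _

theorem pv_nodup_fst_sortedItems (bag : List String) (freq : List Int) :
    ((pvSortedItems bag freq).map Prod.fst).Nodup := by
  exact (((pv_perm_sortedItems bag freq).map Prod.fst).nodup_iff).mpr
    (pv_nodup_fst_pvFirsts _ _)

theorem pv_sortedItems_pairwise (bag : List String) (freq : List Int) :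
    (pvSortedItems bag freq).Pairwise (fun p q => p.1 < q.1) := by
  have hle : (pvSortedItems bag freq).Pairwise (fun p q => p.1 ≤ q.1) := by
    rw [pv_sortedItems_eq]
    exact PySem.List.sorted_pairwise _ _
  have hne : (pvSortedItems bag freq).Pairwise (fun p q => p.1 ≠ q.1) :=
    (List.pairwise_map).mp (pv_nodup_fst_sortedItems bag freq)
  exact (hle.and hne).imp (fun h => lt_of_le_of_ne h.1 h.2)

theorem pv_look_sortedItems (bag : List String) (freq : List Int) (w : String)
    (hpre : ∀ w ∈ bag, (PySem.List.index? bag w).getD 0 < freq.length) :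
    pvLook (pvSortedItems bag freq) w = pvValA bag freq w := by
  unfold pvLook
  rw [pv_find?_perm _ _ w (pv_perm_sortedItems bag freq) (pv_nodup_fst_pvFirsts _ _),
    pv_find?_pvFirsts]
  have : PySem.Set.contains (PySem.Set.empty : PySem.Set String) w = false := rfl
  rw [this, if_neg (by simp)]
  exact pv_look_zip bag freq w hpre

theorem pv_mem_fst_sortedItems (bag : List String) (freq : List Int) (w : String)
    (hpre : ∀ w ∈ bag, (PySem.List.index? bag w).getD 0 < freq.length) :
    w ∈ (pvSortedItems bag freq).map Prod.fst ↔ w ∈ bag := by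
  rw [((pv_perm_sortedItems bag freq).map Prod.fst).mem_iff, pv_mem_fst_pvFirsts,
    ← pv_mem_fst_zip bag freq w hpre]
  simp

theorem pv_upd_eq_max (d x : Int) : (if d < x then x else d) = max d x := by
  rw [max_def]
  split <;> split <;> omega

theorem pv_fold_pairs (q : List (String × Int)) (hq : q.Pairwise (fun p r => p.1 < r.1))
    (φ : Int → Int) (dist : Int) :
    q.foldl (fun d p => if d < φ p.2 then φ p.2 else d) dist
      = (q.map Prod.fst).foldl (fun d w => max d (φ (pvLook q w))) dist := by
  induction q generalizing dist with
  | nil => rfl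
  | cons p rest ih =>
    obtain ⟨hhead, htail⟩ := List.pairwise_cons.mp hq
    rw [List.foldl_cons, List.map_cons, List.foldl_cons]
    have h1 : pvLook (p :: rest) p.1 = p.2 := by
      unfold pvLook
      rw [List.find?_cons_of_pos (by simp)]
      rfl
    rw [h1, pv_upd_eq_max, ih htail]
    refine PySem.List.foldl_congr_mem _ _ _ _ ?_
    intro d w hw
    obtain ⟨r, hr, rfl⟩ := List.mem_map.mp hw
    have : pvLook (p :: rest) r.1 = pvLook rest r.1 := by
      unfold pvLook
      rw [List.find?_cons_of_neg (by simp only [beq_iff_eq]; exact ne_of_lt (hhead r hr))]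
    rw [this]

theorem pv_look_cons_self (x : String) (v : Int) (q : List (String × Int)) :
    pvLook ((x, v) :: q) x = v := by
  unfold pvLook
  rw [List.find?_cons_of_pos (by simp)]
  rfl

theorem pv_look_cons_ne (x : String) (v : Int) (q : List (String × Int)) (u : String)
    (h : x ≠ u) : pvLook ((x, v) :: q) u = pvLook q u := by
  unfold pvLook
  rw [List.find?_cons_of_neg (by simpa using h)]

theorem pv_look_not_mem (q : List (String × Int)) (u : String)
    (h : u ∉ q.map Prod.fst) : pvLook q u = 0 := by
  unfold pvLook
  rw [List.find?_eq_none.mpr]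
  · rfl
  · intro p hp hpu
    exact h (List.mem_map.mpr ⟨p, hp, beq_iff_eq.mp hpu⟩)

theorem pvMergeLoop_nil_left (q2 : List (String × Int)) (dist : Int) :
    pvMergeLoop [] q2 dist = q2.foldl (fun dist p => if dist < |p.2| then |p.2| else dist) dist := by
  simp [pvMergeLoop]

theorem pvMergeLoop_nil_right (p : String × Int) (q1 : List (String × Int)) (dist : Int) :
    pvMergeLoop (p :: q1) [] dist
      = (p :: q1).foldl (fun dist q => if dist < |q.2| then |q.2| else dist) dist := by
  simp [pvMergeLoop]

theorem pvMergeLoop_cons_eq (w1 : String) (a : Int) (q1 : List (String × Int)) (b : Int)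
    (q2 : List (String × Int)) (dist : Int) :
    pvMergeLoop ((w1, a) :: q1) ((w1, b) :: q2) dist
      = pvMergeLoop q1 q2 (if dist < |a - b| then |a - b| else dist) := by
  simp [pvMergeLoop]

theorem pvMergeLoop_cons_lt (w1 : String) (a : Int) (q1 : List (String × Int)) (w2 : String)
    (b : Int) (q2 : List (String × Int)) (dist : Int) (h : w1 < w2) :
    pvMergeLoop ((w1, a) :: q1) ((w2, b) :: q2) dist
      = pvMergeLoop q1 ((w2, b) :: q2) (if dist < |a| then |a| else dist) := by
  simp [pvMergeLoop, h, ne_of_lt h]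

theorem pvMergeLoop_cons_gt (w1 : String) (a : Int) (q1 : List (String × Int)) (w2 : String)
    (b : Int) (q2 : List (String × Int)) (dist : Int) (hne : ¬w1 = w2) (hnlt : ¬w1 < w2) :
    pvMergeLoop ((w1, a) :: q1) ((w2, b) :: q2) dist
      = pvMergeLoop ((w1, a) :: q1) q2 (if dist < |b| then |b| else dist) := by
  simp [pvMergeLoop, hne, hnlt]

-- pushing one middle element of a running max into the accumulator
theorem pv_foldl_max_middle (g : String → Int) (xs ys : List String) (y : String) (d : Int) :
    (xs ++ y :: ys).foldl (fun a w => max a (g w)) d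
      = (xs ++ ys).foldl (fun a w => max a (g w)) (max d (g y)) := by
  induction xs generalizing d with
  | nil => rfl
  | cons x xs ih => simpa [max_right_comm] using ih (max d (g x))

theorem pv_merge_eq (q1 q2 : List (String × Int)) (dist : Int)
    (h1 : q1.Pairwise (fun p r => p.1 < r.1)) (h2 : q2.Pairwise (fun p r => p.1 < r.1)) :
    pvMergeLoop q1 q2 dist
      = (q1.map Prod.fst ++ (q2.map Prod.fst).filter (fun w => !(q1.map Prod.fst).contains w)).foldl
          (fun d w => max d |pvLook q1 w - pvLook q2 w|) dist := by
  revert h1 h2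
  induction q1, q2, dist using pvMergeLoop.induct with
  | case1 q2 dist =>
    intro _ h2
    rw [pvMergeLoop_nil_left]
    simp only [List.map_nil, List.nil_append]
    have hfil : (q2.map Prod.fst).filter (fun w => !(([] : List String).contains w))
        = q2.map Prod.fst := by
      simp
    rw [hfil, pv_fold_pairs q2 h2 (fun x => |x|) dist]
    refine PySem.List.foldl_congr_mem _ _ _ _ ?_
    intro d w _
    have h0 : pvLook [] w = 0 := rfl
    rw [h0, zero_sub, abs_neg]
  | case2 p q1 dist =>
    intro h1 _
    rw [pvMergeLoop_nil_right]
    simp only [List.map_nil, List.filter_nil, List.append_nil]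
    rw [pv_fold_pairs _ h1 (fun x => |x|) dist]
    refine PySem.List.foldl_congr_mem _ _ _ _ ?_
    intro d w _
    have h0 : pvLook [] w = 0 := rfl
    rw [h0, sub_zero]
  | case3 a q1 w1 b q2 dist ih =>
    intro h1 h2
    obtain ⟨hh1, ht1⟩ := List.pairwise_cons.mp h1
    obtain ⟨hh2, ht2⟩ := List.pairwise_cons.mp h2
    rw [pvMergeLoop_cons_eq]
    have ih' := ih ht1 ht2
    simp only [dite_eq_ite] at ih'
    rw [ih', pv_upd_eq_max]
    simp only [List.map_cons]
    rw [List.filter_cons, if_neg (by simp)]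
    have hfil : (q2.map Prod.fst).filter (fun w => !((w1 :: q1.map Prod.fst).contains w))
        = (q2.map Prod.fst).filter (fun w => !((q1.map Prod.fst).contains w)) := by
      refine List.filter_congr ?_
      intro w hw
      obtain ⟨r, hr, rfl⟩ := List.mem_map.mp hw
      have hne : r.1 ≠ w1 := ne_of_gt (hh2 r hr)
      simp [hne]
    rw [hfil, List.cons_append, List.foldl_cons, pv_look_cons_self, pv_look_cons_self]
    refine (PySem.List.foldl_congr_mem _ _
      (fun d w => max d |pvLook q1 w - pvLook q2 w|) _ ?_).symm
    intro d u hu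
    have hu1 : w1 ≠ u := by
      rcases List.mem_append.mp hu with h | h
      · obtain ⟨r, hr, rfl⟩ := List.mem_map.mp h
        exact ne_of_lt (hh1 r hr)
      · obtain ⟨r, hr, rfl⟩ := List.mem_map.mp (List.mem_of_mem_filter h)
        exact ne_of_lt (hh2 r hr)
    rw [pv_look_cons_ne _ _ _ _ hu1, pv_look_cons_ne _ _ _ _ hu1]
  | case4 w1 a q1 w2 b q2 dist hne hlt ih =>
    intro h1 h2
    obtain ⟨hh1, ht1⟩ := List.pairwise_cons.mp h1
    obtain ⟨hh2, ht2⟩ := List.pairwise_cons.mp h2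
    rw [pvMergeLoop_cons_lt _ _ _ _ _ _ _ hlt]
    have ih' := ih ht1 h2
    simp only [dite_eq_ite] at ih'
    rw [ih', pv_upd_eq_max]
    simp only [List.map_cons]
    have hw1L2 : w1 ∉ w2 :: q2.map Prod.fst := by
      simp only [List.mem_cons]
      rintro (h | h)
      · exact hne h
      · obtain ⟨r, hr, hrw⟩ := List.mem_map.mp h
        have hx : w1 < r.1 := lt_trans hlt (hh2 r hr)
        rw [hrw] at hx
        exact absurd hx (lt_irrefl w1)
    have hfil : (w2 :: q2.map Prod.fst).filter (fun w => !((w1 :: q1.map Prod.fst).contains w))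
        = (w2 :: q2.map Prod.fst).filter (fun w => !((q1.map Prod.fst).contains w)) := by
      refine List.filter_congr ?_
      intro w hw
      have hwne : w ≠ w1 := by
        simp only [List.mem_cons] at hw
        rcases hw with rfl | hw
        · exact ne_of_gt hlt
        · obtain ⟨r, hr, rfl⟩ := List.mem_map.mp hw
          exact ne_of_gt (lt_trans hlt (hh2 r hr))
      simp [hwne]
    rw [List.cons_append, List.foldl_cons, hfil, pv_look_cons_self,
      pv_look_not_mem ((w2, b) :: q2) w1 (by simpa using hw1L2), sub_zero]
    refine (PySem.List.foldl_congr_mem _ _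
      (fun d w => max d |pvLook q1 w - pvLook ((w2, b) :: q2) w|) _ ?_).symm
    intro d u hu
    have hu1 : w1 ≠ u := by
      rcases List.mem_append.mp hu with h | h
      · obtain ⟨r, hr, rfl⟩ := List.mem_map.mp h
        exact ne_of_lt (hh1 r hr)
      · have h' := List.mem_of_mem_filter h
        simp only [List.mem_cons] at h'
        rcases h' with rfl | h'
        · exact ne_of_lt hlt
        · obtain ⟨r, hr, rfl⟩ := List.mem_map.mp h'
          exact ne_of_lt (lt_trans hlt (hh2 r hr))
    rw [pv_look_cons_ne _ _ _ _ hu1]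
  | case5 w1 a q1 w2 b q2 dist hne hnlt ih =>
    intro h1 h2
    obtain ⟨hh1, ht1⟩ := List.pairwise_cons.mp h1
    obtain ⟨hh2, ht2⟩ := List.pairwise_cons.mp h2
    have hgt : w2 < w1 := by
      rcases lt_trichotomy w1 w2 with h | h | h
      · exact absurd h hnlt
      · exact absurd h hne
      · exact h
    rw [pvMergeLoop_cons_gt _ _ _ _ _ _ _ hne hnlt]
    have ih' := ih h1 ht2
    simp only [dite_eq_ite] at ih'
    rw [ih', pv_upd_eq_max]
    simp only [List.map_cons]
    have hw2L1 : w2 ∉ w1 :: q1.map Prod.fst := by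
      simp only [List.mem_cons]
      rintro (h | h)
      · exact hne h.symm
      · obtain ⟨r, hr, hrw⟩ := List.mem_map.mp h
        have hx : w2 < r.1 := lt_trans hgt (hh1 r hr)
        rw [hrw] at hx
        exact absurd hx (lt_irrefl w2)
    rw [List.filter_cons, if_pos (by simpa using hw2L1), pv_foldl_max_middle,
      pv_look_not_mem ((w1, a) :: q1) w2 (by simpa using hw2L1),
      pv_look_cons_self, zero_sub, abs_neg]
    refine (PySem.List.foldl_congr_mem _ _
      (fun d w => max d |pvLook ((w1, a) :: q1) w - pvLook q2 w|) _ ?_).symm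
    intro d u hu
    have hu2 : w2 ≠ u := by
      rcases List.mem_append.mp hu with h | h
      · simp only [List.mem_cons] at h
        rcases h with rfl | h
        · exact ne_of_lt hgt
        · obtain ⟨r, hr, rfl⟩ := List.mem_map.mp h
          exact ne_of_lt (lt_trans hgt (hh1 r hr))
      · obtain ⟨r, hr, rfl⟩ := List.mem_map.mp (List.mem_of_mem_filter h)
        exact ne_of_lt (hh2 r hr)
    rw [pv_look_cons_ne _ _ _ _ hu2]

-- upper bound for a running max (converse of PySem.List.le_foldl_max_int)
theorem pv_foldl_max_le_int {α : Type} (l : List α) (f : α → Int) (c : Int) :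
    ∀ init, init ≤ c → (∀ x ∈ l, f x ≤ c) → l.foldl (fun a x => max a (f x)) init ≤ c := by
  induction l with
  | nil => intro init h0 _; exact h0
  | cons x xs ih =>
    intro init h0 h
    exact ih _ (max_le h0 (h x List.mem_cons_self)) (fun y hy => h y (List.mem_cons_of_mem x hy))

-- two running maxima from 0 over lists with the same members agree
theorem pv_foldl_max_eq_of_mem_iff {α : Type} (l1 l2 : List α) (f : α → Int)
    (h : ∀ x, x ∈ l1 ↔ x ∈ l2) :
    l1.foldl (fun a x => max a (f x)) 0 = l2.foldl (fun a x => max a (f x)) 0 := by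
  obtain ⟨h10, h1b⟩ := PySem.List.le_foldl_max_int l1 f 0
  obtain ⟨h20, h2b⟩ := PySem.List.le_foldl_max_int l2 f 0
  exact le_antisymm
    (pv_foldl_max_le_int l1 f _ 0 h20 (fun x hx => h2b x ((h x).mp hx)))
    (pv_foldl_max_le_int l2 f _ 0 h10 (fun x hx => h1b x ((h x).mpr hx)))

-- ===== VERDICT (by name: the statement is the Claim_ definition above) =====
theorem linfinitynorm_spec : Claim_equal_linfinitynorm := by
  intro b1 f1 b2 f2 _ hpre
  obtain ⟨hp1, hp2⟩ := hpre
  unfold Spec_linfinitynorm linfinitynorm linfinitynorm_alt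
  simp only []
  -- B's merge loop is a running max over the union of the sorted distinct words
  rw [pv_merge_eq _ _ 0 (pv_sortedItems_pairwise b1 f1) (pv_sortedItems_pairwise b2 f2)]
  -- A's loop body is the same running max of |a - b| over per-word values
  rw [PySem.List.foldl_congr_mem _ _
      (fun distance word => max distance |pvValA b1 f1 word - pvValA b2 f2 word|) 0
      (by
        intro acc w _
        simp only [pvValA, pv_upd_eq_max])]
  -- B's lookups compute A's per-word values (under Pre_)
  rw [show (fun d w => max d |pvLook (pvSortedItems b1 f1) w - pvLook (pvSortedItems b2 f2) w|)
        = (fun d w => max d |pvValA b1 f1 w - pvValA b2 f2 w|) from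
      funext fun d => funext fun w => by
        rw [pv_look_sortedItems b1 f1 w hp1, pv_look_sortedItems b2 f2 w hp2]]
  -- both sides are running maxima of the same function over member-equal lists
  apply pv_foldl_max_eq_of_mem_iff
  intro w
  rw [PySem.Set.mem_ofList, List.mem_append, List.mem_append, List.mem_filter,
    pv_mem_fst_sortedItems b1 f1 w hp1, pv_mem_fst_sortedItems b2 f2 w hp2]
  constructor
  · rintro (h1 | h2)
    · exact Or.inl h1
    · by_cases h1 : w ∈ b1
      · exact Or.inl h1
      · refine Or.inr ⟨h2, ?_⟩
        cases hcc : ((pvSortedItems b1 f1).map Prod.fst).contains w with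
        | false => rfl
        | true =>
          simp only [List.contains_eq_mem, decide_eq_true_eq] at hcc
          exact absurd ((pv_mem_fst_sortedItems b1 f1 w hp1).mp hcc) h1
  · rintro (h1 | ⟨h2, _⟩)
    · exact Or.inl h1
    · exact Or.inr h2
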